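-- pv_equiv track=rewrite | github.com/Gabriele-mp/FDS-DITTO-DATI | src/feature_builder_Model2.py | calculate_paralysis_advantage
-- ===== SOURCE A (Python) =====
-- def calculate_paralysis_advantage(timeline):
--     p1_par_points = 0
--     p2_par_points = 0
--     p1_status_prev = {}
--     p2_status_prev = {}
--     for turn in timeline:
--         p1_state = turn.get('p1_pokemon_state')
--         p2_state = turn.get('p2_pokemon_state')
--         if p1_state and p2_state:
--             p2_name = p2_state['name']
--             p2_status_now = p2_state.get('status')
--             if p2_status_now == 'par' and p2_status_prev.get(p2_name) != 'par':
--                 p1_par_points += 1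
--             p2_status_prev[p2_name] = p2_status_now
--         if p1_state and p2_state:
--             p1_name = p1_state['name']
--             p1_status_now = p1_state.get('status')
--             if p1_status_now == 'par' and p1_status_prev.get(p1_name) != 'par':
--                 p2_par_points += 1
--             p1_status_prev[p1_name] = p1_status_now
--     return {'paralysis_advantage': p1_par_points - p2_par_points}
-- ===== SOURCE B (Python) =====
-- def calculate_paralysis_advantage(timeline):
--     # Phase 1: collect, per player and per pokemon name, the ordered list of
--     # statuses over the turns where both states are present.
--     p1names = {}
--     p2names = {}
--     for turn in timeline:
--         p1_state = turn.get('p1_pokemon_state')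
--         p2_state = turn.get('p2_pokemon_state')
--         if p1_state and p2_state:
--             p1names.setdefault(p1_state['name'], []).append(p1_state.get('status'))
--             p2names.setdefault(p2_state['name'], []).append(p2_state.get('status'))
--     # Phase 2: count rising edges into 'par' in each status sequence.
--     def _rising(seq):
--         cnt = 0
--         prev = None
--         for s in seq:
--             if s == 'par' and prev != 'par':
--                 cnt += 1
--             prev = s
--         return cnt
--     p1_par_points = sum(_rising(seq) for seq in p2names.values())
--     p2_par_points = sum(_rising(seq) for seq in p1names.values())
--     return {'paralysis_advantage': p1_par_points - p2_par_points}
-- ===== Notes on version B (the rewrite author's own statement) =====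
-- stated objective: alternative
-- what changed: Replaced A's single incremental pass that tracks each pokemon's previous status in a dict while counting with a two-phase build-then-count: first group the status history per player and per pokemon name, then count rising edges into 'par' in each sequence and sum.
import Mathlib
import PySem

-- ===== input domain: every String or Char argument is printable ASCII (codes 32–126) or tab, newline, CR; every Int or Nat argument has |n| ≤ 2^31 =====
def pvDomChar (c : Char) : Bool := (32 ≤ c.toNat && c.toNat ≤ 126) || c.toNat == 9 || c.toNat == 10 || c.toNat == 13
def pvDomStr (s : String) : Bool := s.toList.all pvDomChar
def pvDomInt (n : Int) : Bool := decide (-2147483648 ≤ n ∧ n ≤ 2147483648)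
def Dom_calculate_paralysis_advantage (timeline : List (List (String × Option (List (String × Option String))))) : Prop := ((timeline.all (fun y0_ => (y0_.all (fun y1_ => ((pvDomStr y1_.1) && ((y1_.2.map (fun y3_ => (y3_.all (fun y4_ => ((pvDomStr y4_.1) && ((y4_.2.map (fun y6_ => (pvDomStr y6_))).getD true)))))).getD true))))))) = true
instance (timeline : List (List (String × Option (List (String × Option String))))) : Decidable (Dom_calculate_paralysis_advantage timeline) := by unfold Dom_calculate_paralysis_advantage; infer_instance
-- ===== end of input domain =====

-- B replaces A's single incremental pass (previous-status dict updated while counting) by a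
-- two-phase build-then-count: group the status history per player and per pokemon name, then
-- count rising edges into 'par' in each sequence; objective: alternative decomposition.

-- ===== PORT A =====
-- shared field accessors (both Pythons contain the identical expressions
-- turn.get('…_pokemon_state'), state['name'], state.get('status'))

-- turn.get(k); the stored value None and a missing key are collapsed by .join — both are falsy
-- and the state is used only when truthy, so this is Python-exact.
def pvGetState (turn : List (String × Option (List (String × Option String)))) (k : String) :
    Option (List (String × Option String)) :=
  ((PySem.Dict.mk turn).get? k).join

-- Python truthiness of the state: a dict is truthy iff non-empty, None is falsy.
def pvTruthy : Option (List (String × Option String)) → Bool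
  | some l => !l.isEmpty
  | none => false

-- st['name']; exact whenever "name" is a key of st (guaranteed by Pre_ on every guarded turn).
def pvNameOf (st : List (String × Option String)) : Option String :=
  ((PySem.Dict.mk st).get? "name").join

-- st.get('status'): missing key and stored None both give None, exactly .join.
def pvStatusOf (st : List (String × Option String)) : Option String :=
  ((PySem.Dict.mk st).get? "status").join

-- one (name, status) observation; pvStep is A's guarded block: bump the counter on a rising
-- edge into 'par' judged against the previous-status dict, then store the current status.
def pvStep (cp : Int × PySem.Dict (Option String) (Option String))
    (q : Option String × Option String) :
    Int × PySem.Dict (Option String) (Option String) :=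
  ((if q.2 = some "par" ∧ cp.2.getD q.1 none ≠ some "par" then cp.1 + 1 else cp.1),
   cp.2.insert q.1 q.2)

-- A's loop body: state = (p1_par_points, p2_par_points, p1_status_prev, p2_status_prev);
-- the p2 block runs first, then the p1 block, each under the same both-truthy guard.
def pvStepA
    (st : Int × Int × PySem.Dict (Option String) (Option String) ×
          PySem.Dict (Option String) (Option String))
    (turn : List (String × Option (List (String × Option String)))) :
    Int × Int × PySem.Dict (Option String) (Option String) ×
      PySem.Dict (Option String) (Option String) :=
  let p1s := pvGetState turn "p1_pokemon_state"
  let p2s := pvGetState turn "p2_pokemon_state"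
  let a := if pvTruthy p1s && pvTruthy p2s then
             pvStep (st.1, st.2.2.2) (pvNameOf (p2s.getD []), pvStatusOf (p2s.getD []))
           else (st.1, st.2.2.2)
  let b := if pvTruthy p1s && pvTruthy p2s then
             pvStep (st.2.1, st.2.2.1) (pvNameOf (p1s.getD []), pvStatusOf (p1s.getD []))
           else (st.2.1, st.2.2.1)
  (a.1, b.1, b.2, a.2)

def calculate_paralysis_advantage (timeline : List (List (String × Option (List (String × Option String))))) : List (String × Int) :=
  let fin := timeline.foldl pvStepA (0, 0, PySem.Dict.empty, PySem.Dict.empty)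
  [("paralysis_advantage", fin.1 - fin.2.1)]

-- ===== PORT B =====
-- Phase 1 loop body: append each player's current status to that pokemon's history;
-- setdefault(k, []).append(s) is exactly modify k [] (· ++ [s]).
def pvStepB
    (gs : PySem.Dict (Option String) (List (Option String)) ×
          PySem.Dict (Option String) (List (Option String)))
    (turn : List (String × Option (List (String × Option String)))) :
    PySem.Dict (Option String) (List (Option String)) ×
      PySem.Dict (Option String) (List (Option String)) :=
  let p1s := pvGetState turn "p1_pokemon_state"
  let p2s := pvGetState turn "p2_pokemon_state"
  if pvTruthy p1s && pvTruthy p2s then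
    (gs.1.modify (pvNameOf (p1s.getD [])) [] (· ++ [pvStatusOf (p1s.getD [])]),
     gs.2.modify (pvNameOf (p2s.getD [])) [] (· ++ [pvStatusOf (p2s.getD [])]))
  else gs

-- Phase 2: _rising(seq) — count entries into 'par' scanning the sequence once.
def pvRising (seq : List (Option String)) : Int :=
  (seq.foldl
    (fun (cp : Int × Option String) s =>
      ((if s = some "par" ∧ cp.2 ≠ some "par" then cp.1 + 1 else cp.1), s))
    (0, none)).1

def calculate_paralysis_advantage_alt (timeline : List (List (String × Option (List (String × Option String))))) : List (String × Int) :=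
  let gs := timeline.foldl pvStepB (PySem.Dict.empty, PySem.Dict.empty)
  let p1_par_points := (gs.2.values.map pvRising).sum
  let p2_par_points := (gs.1.values.map pvRising).sum
  [("paralysis_advantage", p1_par_points - p2_par_points)]

-- ===== PRECONDITION & SPEC =====
-- Pre_ excludes exactly the inputs where Python A raises KeyError: a turn whose two states are
-- both truthy but one of them has no 'name' key.
def Pre_calculate_paralysis_advantage (timeline : List (List (String × Option (List (String × Option String))))) : Prop :=
  ∀ turn ∈ timeline,
    (pvTruthy (pvGetState turn "p1_pokemon_state") &&
     pvTruthy (pvGetState turn "p2_pokemon_state")) = true →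
      ((PySem.Dict.mk ((pvGetState turn "p1_pokemon_state").getD [])).contains "name" = true ∧
       (PySem.Dict.mk ((pvGetState turn "p2_pokemon_state").getD [])).contains "name" = true)
instance (timeline : List (List (String × Option (List (String × Option String))))) : Decidable (Pre_calculate_paralysis_advantage timeline) := by unfold Pre_calculate_paralysis_advantage; infer_instance

def pvWitness_calculate_paralysis_advantage : (List (List (String × Option (List (String × Option String))))) :=
  [[("p1_pokemon_state", some [("name", some "a"), ("status", some "par")]),
    ("p2_pokemon_state", some [("name", some "b"), ("status", none)])],
   [("p1_pokemon_state", some [("name", some "a"), ("status", some "par")]),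
    ("p2_pokemon_state", some [("name", some "b"), ("status", some "par")])]]

def Spec_calculate_paralysis_advantage (timeline : List (List (String × Option (List (String × Option String))))) (out : List (String × Int)) : Prop := out = calculate_paralysis_advantage_alt timeline
instance (timeline : List (List (String × Option (List (String × Option String))))) (out : List (String × Int)) : Decidable (Spec_calculate_paralysis_advantage timeline out) := by unfold Spec_calculate_paralysis_advantage; infer_instance

-- ===== CLAIM (what is proved, stated in full; the proofs are below) =====
def Claim_equal_calculate_paralysis_advantage : Prop := ∀ (timeline : List (List (String × Option (List (String × Option String))))), Dom_calculate_paralysis_advantage timeline → Pre_calculate_paralysis_advantage timeline → Spec_calculate_paralysis_advantage timeline (calculate_paralysis_advantage timeline)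

-- ===== LEMMAS AND PROOFS =====

-- the guarded (name, status) observations of each player, in turn order
def pvPairs1 (timeline : List (List (String × Option (List (String × Option String))))) :
    List (Option String × Option String) :=
  timeline.filterMap (fun turn =>
    if pvTruthy (pvGetState turn "p1_pokemon_state") &&
       pvTruthy (pvGetState turn "p2_pokemon_state") then
      some (pvNameOf ((pvGetState turn "p1_pokemon_state").getD []),
            pvStatusOf ((pvGetState turn "p1_pokemon_state").getD []))
    else none)

def pvPairs2 (timeline : List (List (String × Option (List (String × Option String))))) :
    List (Option String × Option String) :=
  timeline.filterMap (fun turn =>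
    if pvTruthy (pvGetState turn "p1_pokemon_state") &&
       pvTruthy (pvGetState turn "p2_pokemon_state") then
      some (pvNameOf ((pvGetState turn "p2_pokemon_state").getD []),
            pvStatusOf ((pvGetState turn "p2_pokemon_state").getD []))
    else none)

def pvGrp (d : PySem.Dict (Option String) (List (Option String)))
    (q : Option String × Option String) :
    PySem.Dict (Option String) (List (Option String)) :=
  d.modify q.1 [] (· ++ [q.2])

def pvInd (s p : Option String) : Int :=
  if s = some "par" ∧ p ≠ some "par" then 1 else 0

def pvRisingFrom (p : Option String) : List (Option String) → Int
  | [] => 0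
  | s :: t => pvInd s p + pvRisingFrom s t

-- A's fold over the timeline decomposes into two independent pvStep folds over the pairs lists
theorem pvA_decomp (timeline : List (List (String × Option (List (String × Option String)))))
    (c1 c2 : Int) (d1 d2 : PySem.Dict (Option String) (Option String)) :
    timeline.foldl pvStepA (c1, c2, d1, d2) =
      (((pvPairs2 timeline).foldl pvStep (c1, d2)).1,
       ((pvPairs1 timeline).foldl pvStep (c2, d1)).1,
       ((pvPairs1 timeline).foldl pvStep (c2, d1)).2,
       ((pvPairs2 timeline).foldl pvStep (c1, d2)).2) := by
  induction timeline generalizing c1 c2 d1 d2 with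
  | nil => simp [pvPairs1, pvPairs2]
  | cons turn rest ih =>
    simp only [List.foldl_cons, pvPairs1, pvPairs2, List.filterMap_cons]
    by_cases h : (pvTruthy (pvGetState turn "p1_pokemon_state") &&
                  pvTruthy (pvGetState turn "p2_pokemon_state")) = true
    · simp only [pvStepA, h, if_true, List.foldl_cons]
      rw [ih]; rfl
    · rw [eq_false_of_ne_true h]
      simp only [pvStepA, eq_false_of_ne_true h, if_false, Bool.false_eq_true]
      rw [ih]; rfl

-- B's collection fold decomposes the same way
theorem pvB_decomp (timeline : List (List (String × Option (List (String × Option String)))))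
    (g1 g2 : PySem.Dict (Option String) (List (Option String))) :
    timeline.foldl pvStepB (g1, g2) =
      ((pvPairs1 timeline).foldl pvGrp g1, (pvPairs2 timeline).foldl pvGrp g2) := by
  induction timeline generalizing g1 g2 with
  | nil => simp [pvPairs1, pvPairs2]
  | cons turn rest ih =>
    simp only [List.foldl_cons, pvPairs1, pvPairs2, List.filterMap_cons]
    by_cases h : (pvTruthy (pvGetState turn "p1_pokemon_state") &&
                  pvTruthy (pvGetState turn "p2_pokemon_state")) = true
    · simp only [pvStepB, h, if_true, List.foldl_cons]
      rw [ih]; rfl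
    · simp only [pvStepB, eq_false_of_ne_true h, if_false, Bool.false_eq_true]
      rw [ih]; rfl

theorem pvRising_foldl (seq : List (Option String)) (c : Int) (p : Option String) :
    (seq.foldl
      (fun (cp : Int × Option String) s =>
        ((if s = some "par" ∧ cp.2 ≠ some "par" then cp.1 + 1 else cp.1), s))
      (c, p)).1 = c + pvRisingFrom p seq := by
  induction seq generalizing c p with
  | nil => simp [pvRisingFrom]
  | cons s t ih =>
    simp only [List.foldl_cons, ih, pvRisingFrom, pvInd]
    split_ifs <;> omega

theorem pvRising_eq (seq : List (Option String)) :
    pvRising seq = pvRisingFrom none seq := by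
  simpa using pvRising_foldl seq 0 none

theorem pvRisingFrom_cons_eq (p s : Option String) (t : List (Option String)) :
    pvRisingFrom p (s :: t) = pvInd s p + pvRisingFrom s t := rfl

-- the per-name decomposition of A's incremental count
theorem pvStep_count (pairs : List (Option String × Option String)) (c : Int)
    (prev : PySem.Dict (Option String) (Option String)) (N : Finset (Option String))
    (hN : ∀ q ∈ pairs, q.1 ∈ N) :
    (pairs.foldl pvStep (c, prev)).1 =
      c + ∑ n ∈ N, pvRisingFrom (prev.getD n none)
        ((pairs.filter (fun q => q.1 == n)).map (·.2)) := by
  induction pairs generalizing c prev with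
  | nil => simp [pvRisingFrom]
  | cons q t ih =>
    have hq : q.1 ∈ N := hN q (List.mem_cons_self)
    have hN' : ∀ r ∈ t, r.1 ∈ N := fun r hr => hN r (List.mem_cons_of_mem _ hr)
    simp only [List.foldl_cons]
    rw [show pvStep (c, prev) q =
        (c + pvInd q.2 (prev.getD q.1 none), prev.insert q.1 q.2) by
      simp only [pvStep, pvInd]; split_ifs <;> simp]
    rw [ih _ _ hN']
    rw [← Finset.add_sum_erase N _ hq, ← Finset.add_sum_erase N _ hq]
    have hterm : ∀ n ∈ N.erase q.1,
        pvRisingFrom ((prev.insert q.1 q.2).getD n none)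
          ((t.filter (fun r => r.1 == n)).map (·.2)) =
        pvRisingFrom (prev.getD n none)
          (((q :: t).filter (fun r => r.1 == n)).map (·.2)) := by
      intro n hn
      have hne : n ≠ q.1 := Finset.ne_of_mem_erase hn
      rw [PySem.Dict.getD_insert]
      rw [List.filter_cons]
      have : (q.1 == n) = false := by
        simp only [beq_eq_false_iff_ne]; exact fun h => hne h.symm
      simp [this, hne]
    rw [Finset.sum_congr rfl hterm]
    have hmain :
        pvRisingFrom (prev.getD q.1 none) (((q :: t).filter (fun r => r.1 == q.1)).map (·.2)) =
        pvInd q.2 (prev.getD q.1 none) +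
          pvRisingFrom ((prev.insert q.1 q.2).getD q.1 none)
            ((t.filter (fun r => r.1 == q.1)).map (·.2)) := by
      rw [PySem.Dict.getD_insert]
      simp only [List.filter_cons, BEq.rfl, if_true, List.map_cons]
      exact pvRisingFrom_cons_eq _ _ _
    rw [hmain]; ring

-- the grouped dictionary's value-wise rising-edge sum equals the same per-name sum
theorem pvGrp_sum (pairs : List (Option String × Option String)) :
    (((pairs.foldl pvGrp PySem.Dict.empty).values.map pvRising)).sum =
      ∑ n ∈ (pairs.map (·.1)).toFinset,
        pvRisingFrom none ((pairs.filter (fun q => q.1 == n)).map (·.2)) := by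
  have hfold : pairs.foldl pvGrp PySem.Dict.empty =
      pairs.foldl (fun d q => d.modify q.1 [] (· ++ [q.2])) PySem.Dict.empty := rfl
  have hkeys : (pairs.foldl pvGrp PySem.Dict.empty).keys =
      PySem.Set.ofList (pairs.map (·.1)) := by
    rw [hfold]
    rw [PySem.Dict.keys_foldl_modify_key pairs (·.1) [] (fun _ q l => l ++ [q.2])]
    simp [PySem.Set.update_nil_left]
  have hnd : (pairs.foldl pvGrp PySem.Dict.empty).keys.Nodup := by
    rw [hkeys]; exact PySem.Set.nodup_ofList _
  rw [PySem.Dict.values_eq_map_keys _ hnd []]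
  rw [List.map_map]
  have hgetD : ∀ n, (pairs.foldl pvGrp PySem.Dict.empty).getD n [] =
      (pairs.filter (fun q => q.1 == n)).map (·.2) := by
    intro n
    rw [hfold, PySem.Dict.getD_foldl_modify_append, PySem.Dict.getD_empty]
    rfl
  have hfun : (pvRising ∘ fun k => (pairs.foldl pvGrp PySem.Dict.empty).getD k []) =
      fun n => pvRisingFrom none ((pairs.filter (fun q => q.1 == n)).map (·.2)) := by
    funext n
    simp only [Function.comp_apply, hgetD, pvRising_eq]
  rw [hfun, hkeys]
  rw [← List.sum_toFinset _ (PySem.Set.nodup_ofList _)]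
  apply Finset.sum_congr
  · ext n
    simp [PySem.Set.mem_ofList]
  · intro _ _; rfl

theorem pvCount_eq (pairs : List (Option String × Option String)) :
    (pairs.foldl pvStep (0, PySem.Dict.empty)).1 =
      ((pairs.foldl pvGrp PySem.Dict.empty).values.map pvRising).sum := by
  rw [pvGrp_sum,
      pvStep_count pairs 0 PySem.Dict.empty ((pairs.map (·.1)).toFinset)
        (fun q hq => List.mem_toFinset.mpr (List.mem_map_of_mem hq))]
  simp [PySem.Dict.getD_empty]

-- ===== VERDICT (by name: the statement is the Claim_ definition above) =====
theorem calculate_paralysis_advantage_spec : Claim_equal_calculate_paralysis_advantage := by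
  intro timeline _ _
  show _ = _
  unfold calculate_paralysis_advantage calculate_paralysis_advantage_alt
  rw [pvA_decomp, pvB_decomp, pvCount_eq (pvPairs1 timeline), pvCount_eq (pvPairs2 timeline)]
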